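-- pv_equiv track=rewrite | github.com/samaysalunke/research-assistant | backend/services/text_processor.py | _get_overlap_sentences
-- ===== SOURCE A (Python) =====
-- from typing import Dict, List, Any, Optional, Tuple
--
-- def _get_overlap_sentences(sentences: List[str], overlap_size: int) -> List[str]:
--     """Get sentences for overlap between chunks"""
--     if not sentences or overlap_size <= 0:
--         return []
--
--     overlap_text = ' '.join(sentences)
--     if len(overlap_text) <= overlap_size:
--         return sentences
--
--     # Find sentence boundary within overlap size
--     current_length = 0
--     overlap_sentences = []
--
--     for sentence in sentences:
--         if current_length + len(sentence) <= overlap_size: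
--             overlap_sentences.append(sentence)
--             current_length += len(sentence)
--         else:
--             break
--
--     return overlap_sentences
-- ===== SOURCE B (Python) =====
-- def _get_overlap_sentences(sentences, overlap_size):
--     """Get sentences for overlap between chunks"""
--     if overlap_size <= 0:
--         return []
--     # prefix[i] = total characters of sentences[0..i] (no separators)
--     prefix = []
--     total = 0
--     for s in sentences:
--         total += len(s)
--         prefix.append(total)
--     # binary search: number of leading prefix sums <= overlap_size
--     lo, hi = 0, len(prefix)
--     while lo < hi:
--         mid = (lo + hi) // 2
--         if prefix[mid] <= overlap_size:
--             lo = mid + 1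
--         else:
--             hi = mid
--     return sentences[:lo]
-- ===== Notes on version B (the rewrite author's own statement) =====
-- stated objective: alternative
-- what changed: Dropped the redundant join-based early return (the separator-free cumulative sums never exceed the joined length), replaced the accumulate-and-break scan by a prefix-sum table plus a binary-search cutoff, and returned sentences[:count].
import Mathlib
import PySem

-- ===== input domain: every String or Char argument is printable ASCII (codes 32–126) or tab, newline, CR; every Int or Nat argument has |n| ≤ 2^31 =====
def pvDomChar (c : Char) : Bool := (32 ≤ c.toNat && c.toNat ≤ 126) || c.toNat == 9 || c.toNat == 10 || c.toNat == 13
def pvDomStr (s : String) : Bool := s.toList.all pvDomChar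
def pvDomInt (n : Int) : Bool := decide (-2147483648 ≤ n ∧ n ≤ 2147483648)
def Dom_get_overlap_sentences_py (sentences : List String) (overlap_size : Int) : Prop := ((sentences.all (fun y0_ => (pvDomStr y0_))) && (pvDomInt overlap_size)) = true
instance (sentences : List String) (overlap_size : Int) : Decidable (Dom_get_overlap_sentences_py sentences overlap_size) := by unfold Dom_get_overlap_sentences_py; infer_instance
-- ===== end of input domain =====

-- B replaces A's join-based early return and accumulate-and-break scan by a prefix-sum table
-- with a binary-search cutoff (alternative decomposition, same result).


-- ===== PORT A =====
-- the for-loop of A: state = (current_length, overlap_sentences); break = return acc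
def pvALoop (overlap_size : Int) : List String → Int → List String → List String
  | [], _, acc => acc
  | s :: rest, cur, acc =>
    if cur + PySem.Str.len s ≤ overlap_size then
      pvALoop overlap_size rest (cur + PySem.Str.len s) (acc ++ [s])
    else acc

def get_overlap_sentences_py (sentences : List String) (overlap_size : Int) : List String :=
  if sentences = [] ∨ overlap_size ≤ 0 then []
  else
    let overlap_text := PySem.Str.join " " sentences
    if PySem.Str.len overlap_text ≤ overlap_size then sentences
    else pvALoop overlap_size sentences 0 []

-- ===== PORT B =====
-- the prefix-building loop of Source B: total accumulates, prefix.append(total)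
def pvPrefixB : List String → Int → List Int
  | [], _ => []
  | s :: rest, total => (total + PySem.Str.len s) :: pvPrefixB rest (total + PySem.Str.len s)

-- the while-loop binary search of Source B; pre[mid] is always in range when hi ≤ pre.length
def pvBisectB (pre : List Int) (overlap_size : Int) (lo hi : Nat) : Nat :=
  if lo < hi then
    let mid := (lo + hi) / 2
    if pre.getD mid 0 ≤ overlap_size then pvBisectB pre overlap_size (mid + 1) hi
    else pvBisectB pre overlap_size lo mid
  else lo
termination_by hi - lo
decreasing_by all_goals omega

def get_overlap_sentences_py_alt (sentences : List String) (overlap_size : Int) : List String :=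
  if overlap_size ≤ 0 then []
  else
    let pre := pvPrefixB sentences 0
    sentences.take (pvBisectB pre overlap_size 0 pre.length)

-- ===== PRECONDITION & SPEC =====
def Spec_get_overlap_sentences_py (sentences : List String) (overlap_size : Int) (out : List String) : Prop := out = get_overlap_sentences_py_alt sentences overlap_size
instance (sentences : List String) (overlap_size : Int) (out : List String) : Decidable (Spec_get_overlap_sentences_py sentences overlap_size out) := by unfold Spec_get_overlap_sentences_py; infer_instance

-- ===== CLAIM (what is proved, stated in full; the proofs are below) =====
def Claim_equal_get_overlap_sentences_py : Prop := ∀ (sentences : List String) (overlap_size : Int), Dom_get_overlap_sentences_py sentences overlap_size → Spec_get_overlap_sentences_py sentences overlap_size (get_overlap_sentences_py sentences overlap_size)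

-- ===== LEMMAS AND PROOFS =====

lemma pvSumLenNonneg (ls : List (List Char)) :
    (0 : Int) ≤ (ls.map (Nat.cast ∘ List.length)).sum :=
  List.sum_nonneg (fun x hx => by
    obtain ⟨l, -, rfl⟩ := List.mem_map.1 hx
    simp)

lemma pvStrLen_nonneg (s : String) : (0 : Int) ≤ PySem.Str.len s := by
  rw [PySem.Str.len_eq]; exact_mod_cast Nat.zero_le _

lemma pvPrefixB_length (l : List String) (t : Int) : (pvPrefixB l t).length = l.length := by
  induction l generalizing t with
  | nil => rfl
  | cons s rest ih => simp [pvPrefixB, ih]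

lemma pvPrefixB_lb (l : List String) (t : Int) : ∀ p ∈ pvPrefixB l t, t ≤ p := by
  induction l generalizing t with
  | nil => simp [pvPrefixB]
  | cons s rest ih =>
      intro p hp
      have hs := pvStrLen_nonneg s
      rcases List.mem_cons.1 hp with h | h
      · omega
      · have := ih (t + PySem.Str.len s) p h; omega

lemma pvPrefixB_sorted (l : List String) (t : Int) :
    (pvPrefixB l t).Pairwise (· ≤ ·) := by
  induction l generalizing t with
  | nil => simp [pvPrefixB]
  | cons s rest ih =>
      refine List.pairwise_cons.2 ⟨?_, ih _⟩
      intro p hp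
      have hs := pvStrLen_nonneg s
      exact pvPrefixB_lb _ _ p hp

-- every prefix sum is bounded by the joined length (' '.join inserts nonnegative separators)
lemma pvPrefixB_le_join (l : List String) (t : Int) :
    ∀ p ∈ pvPrefixB l t, p ≤ t + PySem.Str.len (PySem.Str.join " " l) := by
  induction l generalizing t with
  | nil => simp [pvPrefixB]
  | cons s rest ih =>
      intro p hp
      have hjoin1 : PySem.Str.len s ≤ PySem.Str.len (PySem.Str.join " " (s :: rest)) := by
        cases rest with
        | nil => simp [PySem.Str.join, PySem.Chars.join, List.intercalate, PySem.Str.len_eq]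
        | cons u rs =>
            simp [PySem.Str.join, PySem.Chars.join, List.intercalate, PySem.Str.len_eq]
            have h0 := pvSumLenNonneg (List.intersperse [' '] (u.toList :: List.map String.toList rs))
            omega
      have hjoin2 : PySem.Str.len s + PySem.Str.len (PySem.Str.join " " rest)
          ≤ PySem.Str.len (PySem.Str.join " " (s :: rest)) := by
        cases rest with
        | nil => simp [PySem.Str.join, PySem.Chars.join, List.intercalate, PySem.Str.len_eq]
        | cons u rs =>
            simp [PySem.Str.join, PySem.Chars.join, List.intercalate, PySem.Str.len_eq]
      rcases List.mem_cons.1 hp with h | h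
      · omega
      · have := ih (t + PySem.Str.len s) p h; omega

-- a split point determines countP
lemma countP_eq_of_split (xs : List Int) (ov : Int) (k : Nat) (hk : k ≤ xs.length)
    (h1 : ∀ (j : Nat) (hj : j < xs.length), j < k → xs[j] ≤ ov)
    (h2 : ∀ (j : Nat) (hj : j < xs.length), k ≤ j → ov < xs[j]) :
    xs.countP (fun p => decide (p ≤ ov)) = k := by
  have htake : (xs.take k).countP (fun p => decide (p ≤ ov)) = (xs.take k).length := by
    apply List.countP_eq_length.2
    intro a ha
    obtain ⟨i, hi, rfl⟩ := List.mem_iff_getElem.1 ha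
    have hi' : i < k := by
      have := hi; simp [List.length_take] at this; omega
    have hix : i < xs.length := by
      have := hi; simp [List.length_take] at this; omega
    have he : (xs.take k)[i] = xs[i] := List.getElem_take
    rw [he]; simpa using h1 i hix hi'
  have hdrop : (xs.drop k).countP (fun p => decide (p ≤ ov)) = 0 := by
    apply List.countP_eq_zero.2
    intro a ha
    obtain ⟨i, hi, rfl⟩ := List.mem_iff_getElem.1 ha
    have hix : k + i < xs.length := by
      have := hi; simp [List.length_drop] at this; omega
    have he : (xs.drop k)[i] = xs[k + i] := List.getElem_drop
    rw [he]; simpa using h2 (k + i) hix (by omega)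
  calc xs.countP (fun p => decide (p ≤ ov))
      = ((xs.take k) ++ (xs.drop k)).countP (fun p => decide (p ≤ ov)) := by
        rw [List.take_append_drop]
    _ = (xs.take k).length + 0 := by rw [List.countP_append, htake, hdrop]
    _ = k := by simp [List.length_take]; omega

-- the binary search arrives at the split point, hence computes countP
lemma pvBisectB_eq_countP (xs : List Int) (ov : Int) (lo hi : Nat)
    (hlohi : lo ≤ hi) (hhi : hi ≤ xs.length)
    (h1 : ∀ (j : Nat) (hj : j < xs.length), j < lo → xs[j] ≤ ov)
    (h2 : ∀ (j : Nat) (hj : j < xs.length), hi ≤ j → ov < xs[j])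
    (hsort : xs.Pairwise (· ≤ ·)) :
    pvBisectB xs ov lo hi = xs.countP (fun p => decide (p ≤ ov)) := by
  have hmono := List.pairwise_iff_getElem.1 hsort
  induction lo, hi using pvBisectB.induct xs ov with
  | case1 lo hi hlt mid hle ih =>
      have hle' : xs.getD ((lo + hi) / 2) 0 ≤ ov := hle
      rw [pvBisectB, if_pos hlt, if_pos hle']
      apply ih
      · omega
      · omega
      · intro j hj hjlt
        have hmid : mid < xs.length := by omega
        have hxm : xs.getD mid 0 = xs[mid] := List.getD_eq_getElem xs 0 hmid
        rw [hxm] at hle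
        rcases Nat.lt_or_ge j mid with h | h
        · have hjm : xs[j] ≤ xs[mid] := hmono j mid hj hmid h
          omega
        · have : j = mid := by omega
          subst this; exact hle
      · exact h2
  | case2 lo hi hlt mid hle ih =>
      have hle' : ¬ xs.getD ((lo + hi) / 2) 0 ≤ ov := hle
      rw [pvBisectB, if_pos hlt, if_neg hle']
      apply ih
      · omega
      · omega
      · exact h1
      · intro j hj hjge
        have hmid : mid < xs.length := by omega
        have hxm : xs.getD mid 0 = xs[mid] := List.getD_eq_getElem xs 0 hmid
        have hmv : ov < xs[mid] := by rw [← hxm]; omega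
        rcases Nat.lt_or_ge mid j with h | h
        · have hmj : xs[mid] ≤ xs[j] := hmono mid j hmid hj h
          omega
        · have : j = mid := by omega
          subst this; exact hmv
  | case3 lo hi hnlt =>
      rw [pvBisectB]
      simp only [if_neg hnlt]
      have hk : lo = hi := by omega
      subst hk
      exact (countP_eq_of_split xs ov lo (by omega) h1 (fun j hj hge => h2 j hj hge)).symm


-- A's loop produces the first countP-many sentences
lemma pvALoop_eq_take (ov : Int) (l : List String) (cur : Int) (acc : List String) :
    pvALoop ov l cur acc
      = acc ++ l.take ((pvPrefixB l cur).countP (fun p => decide (p ≤ ov))) := by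
  induction l generalizing cur acc with
  | nil => simp [pvALoop, pvPrefixB]
  | cons s rest ih =>
      by_cases h : cur + PySem.Str.len s ≤ ov
      · rw [pvALoop, if_pos h, ih]
        have hs : cur + (s.length : Int) ≤ ov := by
          have h' := h; rw [PySem.Str.len_eq] at h'; simpa using h'
        have : (pvPrefixB (s :: rest) cur).countP (fun p => decide (p ≤ ov))
            = (pvPrefixB rest (cur + PySem.Str.len s)).countP (fun p => decide (p ≤ ov)) + 1 := by
          simp [pvPrefixB, hs]
        rw [this]
        simp [List.take_succ_cons]
      · rw [pvALoop, if_neg h]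
        have hz : (pvPrefixB (s :: rest) cur).countP (fun p => decide (p ≤ ov)) = 0 := by
          apply List.countP_eq_zero.2
          intro p hp
          simp only [pvPrefixB, List.mem_cons] at hp
          rcases hp with rfl | hp
          · simpa using h
          · have := pvPrefixB_lb rest (cur + PySem.Str.len s) p hp
            simp; omega
        rw [hz]; simp

theorem get_overlap_sentences_py_spec : Claim_equal_get_overlap_sentences_py := by
  intro sentences ov _
  unfold Spec_get_overlap_sentences_py get_overlap_sentences_py get_overlap_sentences_py_alt
  by_cases hov : ov ≤ 0
  · simp [hov]
  · simp only [hov, if_false, or_false]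
    have hbis : pvBisectB (pvPrefixB sentences 0) ov 0 (pvPrefixB sentences 0).length
        = (pvPrefixB sentences 0).countP (fun p => decide (p ≤ ov)) :=
      pvBisectB_eq_countP _ ov 0 _ (Nat.zero_le _) (le_refl _)
        (by intro j hj hlt; omega)
        (by intro j hj hge; omega)
        (pvPrefixB_sorted sentences 0)
    by_cases hnil : sentences = []
    · subst hnil; simp [pvPrefixB, pvBisectB]
    · simp only [hnil, if_false]
      by_cases hjoin : PySem.Str.len (PySem.Str.join " " sentences) ≤ ov
      · simp only [hjoin, if_true]
        rw [hbis]
        have hall : (pvPrefixB sentences 0).countP (fun p => decide (p ≤ ov))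
            = (pvPrefixB sentences 0).length := by
          apply List.countP_eq_length.2
          intro p hp
          have := pvPrefixB_le_join sentences 0 p hp
          simp; omega
        rw [hall, pvPrefixB_length]
        simp
      · simp only [hjoin, if_false]
        rw [hbis, pvALoop_eq_take]
        simp

-- ===== VERDICT (by name: the statement is the Claim_ definition above) =====
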